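-- pv_equiv track=rewrite | github.com/eldr4d/project773 | src/post_time.py | span_hour
-- ===== SOURCE A (Python) =====
-- def span_hour(sec):
--     sits = [[sec[0]]]
--     for x in sec[1:]:
--         if abs(x - sits[-1][-1]) <= 60:
--             sits[-1].append(x)
--         else:
--             sits.append([x])
--     return sits
-- ===== SOURCE B (Python) =====
-- def span_hour(sec):
--     # boundary-finding first, then partition by slicing (same value as A; A raises on [])
--     cuts = [i + 1 for i, (a, b) in enumerate(zip(sec, sec[1:])) if abs(b - a) > 60]
--     bounds = [0] + cuts + [len(sec)]
--     return [sec[b:e] for b, e in zip(bounds, bounds[1:])]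
-- ===== Notes on version B (the rewrite author's own statement) =====
-- stated objective: alternative
-- what changed: B first computes the list of cut positions (indices where adjacent timestamps differ by more than 60) and then partitions the list by slicing between consecutive bounds, instead of A's single pass that grows the last group in an accumulator.
import Mathlib
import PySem

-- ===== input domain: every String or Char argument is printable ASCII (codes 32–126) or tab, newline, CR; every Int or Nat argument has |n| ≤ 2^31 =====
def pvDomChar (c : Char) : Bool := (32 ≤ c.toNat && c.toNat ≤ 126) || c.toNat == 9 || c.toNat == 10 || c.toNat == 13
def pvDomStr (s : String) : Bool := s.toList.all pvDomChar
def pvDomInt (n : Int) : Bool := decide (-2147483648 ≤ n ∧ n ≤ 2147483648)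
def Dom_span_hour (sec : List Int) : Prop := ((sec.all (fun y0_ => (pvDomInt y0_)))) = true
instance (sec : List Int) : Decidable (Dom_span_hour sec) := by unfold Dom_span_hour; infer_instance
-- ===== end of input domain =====

-- B separates boundary-finding (the cut indices) from partitioning (slicing between
-- consecutive bounds) instead of growing groups in an accumulator; objective: alternative
-- decomposition, same return value wherever A returns.

-- ===== PORT A =====
def span_hour (sec : List Int) : List (List Int) :=
  match PySem.List.pyGet? sec 0 with        -- sec[0]; none = IndexError, excluded by Pre_
  | none => []
  | some h =>
    (PySem.List.slice sec (some 1) none).foldl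
      (fun sits x =>
        let last := (PySem.List.pyGet? sits (-1)).getD []          -- sits[-1]
        if |x - (PySem.List.pyGet? last (-1)).getD 0| ≤ 60 then    -- sits[-1][-1]
          sits.dropLast ++ [last ++ [x]]                           -- sits[-1].append(x)
        else
          sits ++ [[x]])                                           -- sits.append([x])
      [[h]]

-- ===== PORT B =====
def span_hour_alt (sec : List Int) : List (List Int) :=
  let cuts := (PySem.List.enumerate (sec.zip (PySem.List.slice sec (some 1) none))).filterMap
      (fun p => if 60 < |p.2.2 - p.2.1| then some (p.1 + 1) else none)
  let bounds := [(0 : Int)] ++ cuts ++ [(sec.length : Int)]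
  (bounds.zip (PySem.List.slice bounds (some 1) none)).map
      (fun p => PySem.List.slice sec (some p.1) (some p.2))

-- ===== PRECONDITION & SPEC =====
-- Pre_ excludes only the empty list, on which A raises IndexError (it evaluates sec[0]).
def Pre_span_hour (sec : List Int) : Prop := sec ≠ []
instance (sec : List Int) : Decidable (Pre_span_hour sec) := by unfold Pre_span_hour; infer_instance
def pvWitness_span_hour : List Int := ([0, 70])

def Spec_span_hour (sec : List Int) (out : List (List Int)) : Prop := out = span_hour_alt sec
instance (sec : List Int) (out : List (List Int)) : Decidable (Spec_span_hour sec out) := by unfold Spec_span_hour; infer_instance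

-- ===== CLAIM (what is proved, stated in full; the proofs are below) =====
def Claim_equal_span_hour : Prop := ∀ (sec : List Int), Dom_span_hour sec → Pre_span_hour sec → Spec_span_hour sec (span_hour sec)

-- ===== LEMMAS AND PROOFS =====

-- Reference "split where the gap exceeds 60" recursion both ports are reduced to.
def chop : List Int → List (List Int)
  | [] => []
  | [x] => [[x]]
  | x :: y :: r =>
    if |y - x| ≤ 60 then
      match chop (y :: r) with
      | [] => [[x]]
      | g :: gs => (x :: g) :: gs
    else [x] :: chop (y :: r)

lemma chop_head : ∀ (t : List Int) (x : Int), ∃ g gs, chop (x :: t) = (x :: g) :: gs := by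
  intro t
  induction t with
  | nil => intro x; exact ⟨[], [], rfl⟩
  | cons y r ih =>
    intro x
    obtain ⟨g, gs, hg⟩ := ih y
    by_cases h : |y - x| ≤ 60
    · exact ⟨y :: g, gs, by simp [chop, h, hg]⟩
    · exact ⟨[], chop (y :: r), by simp [chop, h]⟩

-- ---- A's accumulator loop produces chop ----

def glueA (g : List Int) : List (List Int) → List (List Int)
  | [] => [g]
  | c :: cs => (g ++ c.tail) :: cs

lemma A_loop (xs : List Int) : ∀ (pre : List (List Int)) (g : List Int) (p : Int),
    xs.foldl
      (fun sits x =>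
        let last := (PySem.List.pyGet? sits (-1)).getD []
        if |x - (PySem.List.pyGet? last (-1)).getD 0| ≤ 60 then
          sits.dropLast ++ [last ++ [x]]
        else
          sits ++ [[x]])
      (pre ++ [g ++ [p]])
    = pre ++ glueA (g ++ [p]) (chop (p :: xs)) := by
  induction xs with
  | nil => intro pre g p; simp [chop, glueA]
  | cons x r ih =>
    intro pre g p
    have hlast : PySem.List.pyGet? (pre ++ [g ++ [p]]) (-1) = some (g ++ [p]) := by
      rw [PySem.List.pyGet?_neg_one]; simp
    have hlast2 : PySem.List.pyGet? (g ++ [p]) (-1) = some p := by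
      rw [PySem.List.pyGet?_neg_one]; simp
    simp only [List.foldl_cons, hlast, hlast2, Option.getD_some]
    by_cases h : |x - p| ≤ 60
    · simp only [h, if_pos, List.dropLast_concat]
      have := ih pre (g ++ [p]) x
      simp only [List.append_assoc] at this ⊢
      rw [this]
      obtain ⟨g', gs', hg'⟩ := chop_head r x
      simp [chop, h, hg', glueA]
    · simp only [h, if_false]
      have : pre ++ [g ++ [p]] ++ [[x]] = (pre ++ [g ++ [p]]) ++ [([] : List Int) ++ [x]] := by simp
      rw [this, ih (pre ++ [g ++ [p]]) [] x]
      obtain ⟨g', gs', hg'⟩ := chop_head r x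
      simp [chop, h, hg', glueA]

lemma A_eq_chop (h : Int) (t : List Int) : span_hour (h :: t) = chop (h :: t) := by
  have h0 : PySem.List.pyGet? (h :: t) (0 : Int) = some h := by
    simp [PySem.List.pyGet?, PySem.List.pyIdx?]
  have hloop := A_loop t [] [] h
  obtain ⟨g', gs', hg'⟩ := chop_head t h
  simp only [span_hour, h0, PySem.List.slice_from_one, List.tail_cons]
  simpa [hg', glueA] using hloop

-- ---- B's cut positions and slices produce chop ----

def cutsOf (sec : List Int) : List Int :=
  (PySem.List.enumerate (sec.zip (PySem.List.slice sec (some 1) none))).filterMap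
      (fun p => if 60 < |p.2.2 - p.2.1| then some (p.1 + 1) else none)

lemma cuts_shift : ∀ (zs : List (Int × Int)) (s : Int),
    (PySem.List.enumerate zs (s + 1)).filterMap
        (fun p => if 60 < |p.2.2 - p.2.1| then some (p.1 + 1) else none)
      = ((PySem.List.enumerate zs s).filterMap
        (fun p => if 60 < |p.2.2 - p.2.1| then some (p.1 + 1) else none)).map (· + 1) := by
  intro zs
  induction zs with
  | nil => intro s; simp [PySem.List.enumerate_nil]
  | cons z zs ih =>
    intro s
    rw [PySem.List.enumerate_cons, PySem.List.enumerate_cons]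
    simp only [List.filterMap_cons]
    by_cases hc : 60 < |z.2 - z.1|
    · simp only [hc, if_pos, ih (s + 1), List.map_cons]
    · simp only [hc, if_false, ih (s + 1)]

lemma cutsOf_single (x : Int) : cutsOf [x] = [] := by
  simp [cutsOf, PySem.List.slice_from_one, PySem.List.enumerate_nil]

lemma cutsOf_cons2 (x y : Int) (r : List Int) :
    cutsOf (x :: y :: r)
      = (if 60 < |y - x| then [(1 : Int)] else []) ++ (cutsOf (y :: r)).map (· + 1) := by
  unfold cutsOf
  rw [PySem.List.slice_from_one, PySem.List.slice_from_one]
  simp only [List.tail_cons, List.zip_cons_cons, PySem.List.enumerate_cons, List.filterMap_cons]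
  rw [cuts_shift]
  by_cases hc : 60 < |y - x| <;> simp [hc]

lemma cutsOf_pos : ∀ (sec : List Int), ∀ z ∈ cutsOf sec, 1 ≤ z := by
  intro sec
  induction sec with
  | nil => simp [cutsOf, PySem.List.slice_from_one, PySem.List.enumerate_nil]
  | cons x t ih =>
    cases t with
    | nil => simp [cutsOf_single]
    | cons y r =>
      rw [cutsOf_cons2]
      intro z hz
      rcases List.mem_append.1 hz with h | h
      · split_ifs at h <;> simp_all
      · obtain ⟨w, hw, rfl⟩ := List.mem_map.1 h
        have := ih w hw
        omega

lemma slice_cons_shift (x : Int) (t : List Int) (a b : Int) (ha : 0 ≤ a) (hb : 0 ≤ b) :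
    PySem.List.slice (x :: t) (some (a + 1)) (some (b + 1))
      = PySem.List.slice t (some a) (some b) := by
  rw [PySem.List.slice_toNat _ (by omega) (by omega), PySem.List.slice_toNat _ ha hb]
  have ha' : (a + 1).toNat = a.toNat + 1 := by omega
  have hb' : (b + 1).toNat = b.toNat + 1 := by omega
  rw [ha', hb']
  simp [Nat.add_sub_add_right]

lemma slice_cons_head (x : Int) (t : List Int) (b : Int) (hb : 0 ≤ b) :
    PySem.List.slice (x :: t) (some 0) (some (b + 1))
      = x :: PySem.List.slice t (some 0) (some b) := by
  rw [PySem.List.slice_toNat _ (by omega) (by omega), PySem.List.slice_toNat _ le_rfl hb]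
  have hb' : (b + 1).toNat = b.toNat + 1 := by omega
  simp [hb']

lemma shift_block (x : Int) (t : List Int) :
    ∀ (ms : List Int), (∀ z ∈ ms, 0 ≤ z) → ∀ (b : Int), 0 ≤ b →
      (((b + 1) :: ms.map (· + 1)).zip (ms.map (· + 1))).map
          (fun p => PySem.List.slice (x :: t) (some p.1) (some p.2))
        = ((b :: ms).zip ms).map (fun p => PySem.List.slice t (some p.1) (some p.2)) := by
  intro ms
  induction ms with
  | nil => intro _ b _; simp
  | cons m ms' ih =>
    intro hpos b hb
    have hm : 0 ≤ m := hpos m (by simp)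
    simp only [List.map_cons, List.zip_cons_cons]
    rw [slice_cons_shift x t b m hb hm]
    rw [ih (fun z hz => hpos z (by simp [hz])) m hm]

lemma alt_unfold (sec : List Int) :
    span_hour_alt sec
      = ((0 :: (cutsOf sec ++ [(sec.length : Int)])).zip (cutsOf sec ++ [(sec.length : Int)])).map
          (fun p => PySem.List.slice sec (some p.1) (some p.2)) := by
  unfold span_hour_alt cutsOf
  simp [PySem.List.slice_from_one]

lemma B_eq_chop : ∀ (t : List Int) (x : Int), span_hour_alt (x :: t) = chop (x :: t) := by
  intro t
  induction t with
  | nil =>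
    intro x
    rw [alt_unfold, cutsOf_single]
    simp only [List.nil_append, List.length_cons, List.length_nil,
      List.zip_cons_cons, List.zip_nil_right, List.map_cons, List.map_nil]
    rw [PySem.List.slice_toNat _ (by norm_num) (by norm_num)]
    simp [chop]
  | cons y r ih =>
    intro x
    have hlen1 : (((y :: r).length : Nat) : Int) = (r.length : Int) + 1 := by simp
    have hlen2 : (((x :: y :: r).length : Nat) : Int) = ((r.length : Int) + 1) + 1 := by simp
    set n : Int := (r.length : Int) with hn
    set C := cutsOf (y :: r) with hC
    set ms : List Int := C ++ [n + 1] with hms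
    have hpos : ∀ z ∈ ms, 0 ≤ z := by
      intro z hz
      rcases List.mem_append.1 hz with h | h
      · have := cutsOf_pos (y :: r) z h; omega
      · simp at h; omega
    have hmap : C.map (· + 1) ++ [n + 1 + 1] = ms.map (· + 1) := by simp [hms]
    have ihy : ((0 :: ms).zip ms).map (fun p => PySem.List.slice (y :: r) (some p.1) (some p.2))
        = chop (y :: r) := by
      have := ih y
      rw [alt_unfold, hlen1] at this
      simpa [hms, hC] using this
    rw [alt_unfold, cutsOf_cons2, hlen2]
    by_cases hfar : 60 < |y - x|
    · -- a new group starts after x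
      have sb := shift_block x (y :: r) ms hpos 0 le_rfl
      norm_num at sb
      have h1 : PySem.List.slice (x :: y :: r) (some 0) (some 1) = [x] := by
        rw [PySem.List.slice_toNat _ (by norm_num) (by norm_num)]; simp
      simp only [hfar, if_pos, List.cons_append, List.nil_append]
      rw [hmap]
      simp only [List.zip_cons_cons, List.map_cons, h1]
      rw [sb, ihy]
      have hno : ¬ (|y - x| ≤ 60) := by omega
      simp [chop, hno]
    · -- x joins the first group
      obtain ⟨m0, ms'', hdec⟩ := List.exists_cons_of_ne_nil (l := ms) (by simp [hms])
      have hm0 : 0 ≤ m0 := hpos m0 (by rw [hdec]; simp)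
      have hpos'' : ∀ z ∈ ms'', 0 ≤ z := fun z hz => hpos z (by rw [hdec]; simp [hz])
      simp only [hfar, if_false, List.nil_append]
      rw [hmap, hdec]
      simp only [List.map_cons, List.zip_cons_cons]
      rw [slice_cons_head x (y :: r) m0 hm0]
      rw [shift_block x (y :: r) ms'' hpos'' m0 hm0]
      rw [hdec] at ihy
      simp only [List.zip_cons_cons, List.map_cons] at ihy
      have hclose : |y - x| ≤ 60 := by omega
      simp only [chop, hclose, if_pos]
      rw [← ihy]

-- ===== VERDICT (by name: the statement is the Claim_ definition above) =====
theorem span_hour_spec : Claim_equal_span_hour := by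
  intro sec _ hpre
  unfold Spec_span_hour
  match sec, hpre with
  | x :: t, _ => rw [A_eq_chop, B_eq_chop]
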